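-- pv_equiv track=rewrite | github.com/syt06162/Algorithm-Study | programmers/level 3/30_92344_hap_MR.py | solution
-- ===== SOURCE A (Python) =====
-- def solution(board, skill):
--     H = len(board)
--     W = len(board[0])
--     imosBoard = [[0 for i in range(W+1)] for j in range(H+1)]
--     for type, r1, c1, r2, c2, degree in skill:
--         if type == 1:
--             degree *= -1
--         imosBoard[r1][c1] += degree
--         imosBoard[r1][c2+1] -= degree
--         imosBoard[r2+1][c1] -= degree
--         imosBoard[r2+1][c2+1] += degree
--
--     # 위아래휩쓸기
--     for j in range(0,W+1):
--         for i in range(1,H+1):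
--             imosBoard[i][j] += imosBoard[i-1][j]
--
--     # 왼오른휩쓸기
--     for i in range(0,H+1):
--         for j in range(1,W+1):
--             imosBoard[i][j] += imosBoard[i][j-1]
--
--     # board 대입
--     for i in range(H):
--         for j in range(W):
--             board[i][j] += imosBoard[i][j]
--
--     # 결과
--     result = 0
--     for i in range(H):
--         for j in range(W):
--             if board[i][j] > 0:
--                 result += 1
--     return result
-- ===== SOURCE B (Python) =====
-- def solution(board, skill):
--     # Direct rectangle updates instead of a difference (imos) table with two
--     # prefix-sum sweeps.  Mutates board in place, like A does (A adds the same
--     # net per-cell deltas).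
--     H, W = len(board), len(board[0])
--     for t, r1, c1, r2, c2, degree in skill:
--         d = -degree if t == 1 else degree
--         for i in range(r1, r2 + 1):
--             for j in range(c1, c2 + 1):
--                 board[i][j] += d
--     return sum(1 for i in range(H) for j in range(W) if board[i][j] > 0)
-- ===== Notes on version B (the rewrite author's own statement) =====
-- stated objective: simpler
-- what changed: B replaces A's 2D difference (imos) table and its two prefix-sum sweeps by direct per-cell rectangle updates followed by one positive-cell count over the H x W index grid.
-- outside the precondition, e.g. on solution([[1], [1]], [[2, -1, 0, 0, 0, 5]]): A returns 1, B returns 2; on solution([[1]], [[2, 1, 0, 0, 0, 3]]): A returns 1, B returns 1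
import Mathlib
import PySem

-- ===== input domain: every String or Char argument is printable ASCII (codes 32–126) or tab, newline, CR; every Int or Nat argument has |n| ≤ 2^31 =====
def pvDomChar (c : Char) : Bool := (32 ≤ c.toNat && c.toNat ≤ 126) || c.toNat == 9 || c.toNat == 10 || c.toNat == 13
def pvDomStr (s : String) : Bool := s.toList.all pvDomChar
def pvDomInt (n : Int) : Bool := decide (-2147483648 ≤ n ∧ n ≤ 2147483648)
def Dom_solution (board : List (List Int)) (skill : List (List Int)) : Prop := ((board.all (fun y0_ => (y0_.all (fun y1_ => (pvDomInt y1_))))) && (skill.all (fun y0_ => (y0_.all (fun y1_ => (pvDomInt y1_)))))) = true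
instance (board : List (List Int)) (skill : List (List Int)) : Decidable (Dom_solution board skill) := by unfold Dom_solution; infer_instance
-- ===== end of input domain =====

-- ===== PORT A =====
-- B changes: direct per-cell rectangle updates + one count, instead of A's 2D difference
-- (imos) table with two prefix-sum sweeps; objective: simpler.  Both Pythons mutate
-- `board` in place by the same net per-cell deltas; the theorems are about the return value.

-- cell read/update helpers shared by both ports (board[i][j] and board[i][j] += d;
-- indices are in range under Pre_, so List.getD/List.set are exact here)
def get2 (m : List (List Int)) (i j : Nat) : Int := (m.getD i []).getD j 0
def add2 (m : List (List Int)) (i j : Nat) (d : Int) : List (List Int) :=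
  m.set i ((m.getD i []).set j ((m.getD i []).getD j 0 + d))

-- the body of A's first loop: unpack one skill row and do the four difference-table updates
def applySkillA (im : List (List Int)) (s : List Int) : List (List Int) :=
  match s with
  | [t, r1, c1, r2, c2, deg] =>
    let d := if t = 1 then -deg else deg
    let im1 := add2 im r1.toNat c1.toNat d
    let im2 := add2 im1 r1.toNat (c2 + 1).toNat (-d)
    let im3 := add2 im2 (r2 + 1).toNat c1.toNat (-d)
    add2 im3 (r2 + 1).toNat (c2 + 1).toNat d
  | _ => im   -- Python raises on a row that is not a 6-tuple; excluded by Pre_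

-- vertical sweep: for j in range(W+1): for i in range(1,H+1): im[i][j] += im[i-1][j]
def vSweep (H W : Nat) (im : List (List Int)) : List (List Int) :=
  (List.range (W + 1)).foldl (fun im j =>
    (List.range H).foldl (fun im k => add2 im (k + 1) j (get2 im k j)) im) im

-- horizontal sweep: for i in range(H+1): for j in range(1,W+1): im[i][j] += im[i][j-1]
def hSweep (H W : Nat) (im : List (List Int)) : List (List Int) :=
  (List.range (H + 1)).foldl (fun im i =>
    (List.range W).foldl (fun im k => add2 im i (k + 1) (get2 im i k)) im) im

-- board 대입: for i in range(H): for j in range(W): board[i][j] += im[i][j]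
def addBoard (H W : Nat) (im b : List (List Int)) : List (List Int) :=
  (List.range H).foldl (fun b i =>
    (List.range W).foldl (fun b j => add2 b i j (get2 im i j)) b) b

-- 결과: count cells > 0 by index loops
def countA (H W : Nat) (b : List (List Int)) : Int :=
  (List.range H).foldl (fun acc i =>
    (List.range W).foldl (fun acc j => if get2 b i j > 0 then acc + 1 else acc) acc) 0

def solution (board : List (List Int)) (skill : List (List Int)) : Int :=
  let H := board.length
  let W := (board.getD 0 []).length  -- len(board[0]); board = [] raises in Python, outside Pre_
  let im0 := List.replicate (H + 1) (List.replicate (W + 1) (0 : Int))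
  let im1 := skill.foldl applySkillA im0
  let im2 := vSweep H W im1
  let im3 := hSweep H W im2
  countA H W (addBoard H W im3 board)

-- ===== PORT B =====
-- one skill row of B: add d over the whole rectangle [r1..r2] x [c1..c2]
-- (indices are nonnegative under Pre_, so .toNat is exact for board[i][j])
def applySkillB (b : List (List Int)) (s : List Int) : List (List Int) :=
  match s with
  | [t, r1, c1, r2, c2, deg] =>
    let d := if t = 1 then -deg else deg
    (PySem.List.pyRange r1 (r2 + 1) 1).foldl (fun b i =>
      (PySem.List.pyRange c1 (c2 + 1) 1).foldl (fun b j => add2 b i.toNat j.toNat d) b) b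
  | _ => b   -- Python raises on a row that is not a 6-tuple; excluded by Pre_

def solution_alt (board : List (List Int)) (skill : List (List Int)) : Int :=
  let H := board.length
  let W := (board.getD 0 []).length  -- len(board[0]); board = [] raises in Python, outside Pre_
  let b := skill.foldl applySkillB board
  -- sum(1 for i in range(H) for j in range(W) if board[i][j] > 0): a count over the
  -- H x W index grid (ranges of the Nat lengths H, W, so List.range is exact here)
  ((List.range H).map (fun i =>
    (((List.range W).countP (fun j => decide (0 < get2 b i j))) : Int))).sum

-- ===== PRECONDITION & SPEC =====
-- shape of one skill row: a 6-tuple with an in-bounds, well-ordered rectangle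
def skillOK (H W : Int) (s : List Int) : Bool :=
  match s with
  | [_, r1, c1, r2, c2, _] => decide (0 ≤ r1 ∧ r1 ≤ r2 ∧ r2 < H ∧ 0 ≤ c1 ∧ c1 ≤ c2 ∧ c2 < W)
  | _ => false

-- Pre_ = the task's natural domain: a nonempty board whose rows all have at least
-- W = len(board[0]) cells (A only ever reads/writes columns 0..W-1; on a shorter row A
-- raises), and skill rows that are 6-tuples [type,r1,c1,r2,c2,degree] naming a rectangle
-- with 0 <= r1 <= r2 < H and 0 <= c1 <= c2 < W.  Excluded while A still returns: 6-tuples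
-- with negative or unordered coordinates, where A's value comes from Python's
-- negative-index wraparound into the difference table (resp. from an inverted prefix
-- range) — artefacts of A's implementation; everything else excluded is a crash of A.
def Pre_solution (board : List (List Int)) (skill : List (List Int)) : Prop :=
  board ≠ [] ∧ (∀ row ∈ board, (board.getD 0 []).length ≤ row.length) ∧
    ∀ s ∈ skill, skillOK (board.length : Int) ((board.getD 0 []).length : Int) s = true
instance (board : List (List Int)) (skill : List (List Int)) : Decidable (Pre_solution board skill) := by unfold Pre_solution; infer_instance

def pvWitness_solution : List (List Int) × List (List Int) :=
  ([[1, 0], [0, -1]], [[2, 0, 0, 1, 1, 1], [1, 0, 1, 0, 1, 2]])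

def Spec_solution (board : List (List Int)) (skill : List (List Int)) (out : Int) : Prop := out = solution_alt board skill
instance (board : List (List Int)) (skill : List (List Int)) (out : Int) : Decidable (Spec_solution board skill out) := by unfold Spec_solution; infer_instance

-- ===== CLAIM (what is proved, stated in full; the proofs are below) =====
def Claim_equal_solution : Prop := ∀ (board : List (List Int)) (skill : List (List Int)), Dom_solution board skill → Pre_solution board skill → Spec_solution board skill (solution board skill)

-- ===== LEMMAS AND PROOFS =====

-- dimensions invariant: m is an Hn x Wn matrix
def DimsM (Hn Wn : Nat) (m : List (List Int)) : Prop :=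
  m.length = Hn ∧ ∀ i, i < Hn → (m.getD i []).length = Wn

-- per-cell delta that one skill row writes into A's difference table
def diffC (s : List Int) (i j : Nat) : Int :=
  match s with
  | [t, r1, c1, r2, c2, deg] =>
    (if i = r1.toNat ∧ j = c1.toNat then (if t = 1 then -deg else deg) else 0)
    + (if i = r1.toNat ∧ j = (c2 + 1).toNat then -(if t = 1 then -deg else deg) else 0)
    + (if i = (r2 + 1).toNat ∧ j = c1.toNat then -(if t = 1 then -deg else deg) else 0)
    + (if i = (r2 + 1).toNat ∧ j = (c2 + 1).toNat then (if t = 1 then -deg else deg) else 0)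
  | _ => 0

-- per-cell delta of one skill row on the final board (B's rectangle view)
def contribC (s : List Int) (i j : Nat) : Int :=
  match s with
  | [t, r1, c1, r2, c2, deg] =>
    if r1.toNat ≤ i ∧ i < (r2 + 1).toNat ∧ c1.toNat ≤ j ∧ j < (c2 + 1).toNat then
      (if t = 1 then -deg else deg) else 0
  | _ => 0

lemma getD_set_2d (m : List (List Int)) (i i' : Nat) (r : List Int) :
    (m.set i r).getD i' [] = if i = i' ∧ i < m.length then r else m.getD i' [] := by
  by_cases h1 : i = i'
  · subst h1
    by_cases h2 : i < m.length
    · simp [List.getD_eq_getElem?_getD, h2]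
    · rw [List.set_eq_of_length_le (by omega)]
      simp [h2]
  · rw [List.getD_eq_getElem?_getD, List.getElem?_set_ne h1, ← List.getD_eq_getElem?_getD]
    simp [h1]

lemma getD_set_1d (row : List Int) (j j' : Nat) (v : Int) :
    (row.set j v).getD j' 0 = if j = j' ∧ j < row.length then v else row.getD j' 0 := by
  by_cases h1 : j = j'
  · subst h1
    by_cases h2 : j < row.length
    · simp [List.getD_eq_getElem?_getD, h2]
    · rw [List.set_eq_of_length_le (by omega)]
      simp [h2]
  · rw [List.getD_eq_getElem?_getD, List.getElem?_set_ne h1, ← List.getD_eq_getElem?_getD]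
    simp [h1]

lemma dims_add2 {H W : Nat} {m : List (List Int)} (i j : Nat) (d : Int)
    (h : DimsM H W m) : DimsM H W (add2 m i j d) := by
  refine ⟨by simp [add2, h.1], fun i' hi' => ?_⟩
  unfold add2
  rw [getD_set_2d]
  split_ifs with hc
  · obtain ⟨he, _⟩ := hc
    subst he
    rw [List.length_set]
    exact h.2 i hi'
  · exact h.2 i' hi'

-- relaxed row invariant for the board itself: rows may be LONGER than W (Pre_ admits
-- ragged boards whose rows all have at least W cells)
def DimsGe (Hn Wn : Nat) (m : List (List Int)) : Prop :=
  m.length = Hn ∧ ∀ i, i < Hn → Wn ≤ (m.getD i []).length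

lemma dimsGe_add2 {H W : Nat} {m : List (List Int)} (i j : Nat) (d : Int)
    (h : DimsGe H W m) : DimsGe H W (add2 m i j d) := by
  refine ⟨by simp [add2, h.1], fun i' hi' => ?_⟩
  unfold add2
  rw [getD_set_2d]
  split_ifs with hc
  · obtain ⟨he, _⟩ := hc
    subst he
    rw [List.length_set]
    exact h.2 i hi'
  · exact h.2 i' hi'

lemma get2_add2 {m : List (List Int)} (i j i' j' : Nat) (d : Int)
    (hi : i < m.length) (hj : j < (m.getD i []).length) :
    get2 (add2 m i j d) i' j' = get2 m i' j' + (if i' = i ∧ j' = j then d else 0) := by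
  unfold get2 add2
  rw [getD_set_2d]
  by_cases h1 : i' = i
  · subst h1
    rw [if_pos ⟨rfl, hi⟩, getD_set_1d]
    by_cases h2 : j' = j
    · subst h2
      rw [if_pos ⟨rfl, hj⟩, if_pos ⟨rfl, rfl⟩]
    · rw [if_neg (fun h => h2 h.1.symm), if_neg (fun h => h2 h.2), add_zero]
  · rw [if_neg (fun h => h1 h.1.symm), if_neg (fun h => h1 h.1), add_zero]

lemma dims_replicate (H W : Nat) :
    DimsM (H + 1) (W + 1) (List.replicate (H + 1) (List.replicate (W + 1) (0 : Int))) := by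
  refine ⟨by simp, fun i hi => ?_⟩
  rw [List.getD_replicate _ hi]; simp

lemma get2_replicate (H W i j : Nat) :
    get2 (List.replicate (H + 1) (List.replicate (W + 1) (0 : Int))) i j = 0 := by
  unfold get2
  by_cases hi : i < H + 1
  · rw [List.getD_replicate _ hi]
    by_cases hj : j < W + 1
    · rw [List.getD_replicate _ hj]
    · have h : (List.replicate (W + 1) (0 : Int)).length ≤ j := by simp; omega
      rw [List.getD_eq_default _ _ h]
  · have h : (List.replicate (H + 1) (List.replicate (W + 1) (0 : Int))).length ≤ i := by
      simp; omega
    rw [List.getD_eq_default _ _ h]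
    simp

lemma stepA {H W : Nat} {im : List (List Int)} {s : List Int}
    (hdim : DimsM (H + 1) (W + 1) im) (hok : skillOK (H : Int) (W : Int) s = true) :
    DimsM (H + 1) (W + 1) (applySkillA im s) ∧
      ∀ i j, get2 (applySkillA im s) i j = get2 im i j + diffC s i j := by
  rcases s with _ | ⟨t, s⟩; · simp [skillOK] at hok
  rcases s with _ | ⟨r1, s⟩; · simp [skillOK] at hok
  rcases s with _ | ⟨c1, s⟩; · simp [skillOK] at hok
  rcases s with _ | ⟨r2, s⟩; · simp [skillOK] at hok
  rcases s with _ | ⟨c2, s⟩; · simp [skillOK] at hok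
  rcases s with _ | ⟨deg, s⟩; · simp [skillOK] at hok
  rcases s with _ | ⟨x, s⟩; swap; · simp [skillOK] at hok
  simp only [skillOK, decide_eq_true_eq] at hok
  obtain ⟨hr1, hr12, hr2, hc1, hc12, hc2⟩ := hok
  have hb1 : r1.toNat < H + 1 := by omega
  have hb2 : (r2 + 1).toNat < H + 1 := by omega
  have hb3 : c1.toNat < W + 1 := by omega
  have hb4 : (c2 + 1).toNat < W + 1 := by omega
  simp only [applySkillA]
  have D1 : DimsM (H + 1) (W + 1)
      (add2 im r1.toNat c1.toNat (if t = 1 then -deg else deg)) := dims_add2 _ _ _ hdim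
  have D2 : DimsM (H + 1) (W + 1)
      (add2 (add2 im r1.toNat c1.toNat (if t = 1 then -deg else deg)) r1.toNat (c2 + 1).toNat
        (-(if t = 1 then -deg else deg))) := dims_add2 _ _ _ D1
  have D3 : DimsM (H + 1) (W + 1)
      (add2 (add2 (add2 im r1.toNat c1.toNat (if t = 1 then -deg else deg)) r1.toNat
          (c2 + 1).toNat (-(if t = 1 then -deg else deg))) (r2 + 1).toNat c1.toNat
        (-(if t = 1 then -deg else deg))) := dims_add2 _ _ _ D2
  refine ⟨dims_add2 _ _ _ D3, fun i j => ?_⟩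
  rw [get2_add2 _ _ _ _ _ (by rw [D3.1]; exact hb2) (by rw [D3.2 _ hb2]; exact hb4),
      get2_add2 _ _ _ _ _ (by rw [D2.1]; exact hb2) (by rw [D2.2 _ hb2]; exact hb3),
      get2_add2 _ _ _ _ _ (by rw [D1.1]; exact hb1) (by rw [D1.2 _ hb1]; exact hb4),
      get2_add2 _ _ _ _ _ (by rw [hdim.1]; exact hb1) (by rw [hdim.2 _ hb1]; exact hb3)]
  simp only [diffC]
  ring

lemma foldlA {H W : Nat} (skill : List (List Int)) (im : List (List Int))
    (hdim : DimsM (H + 1) (W + 1) im)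
    (hok : ∀ s ∈ skill, skillOK (H : Int) (W : Int) s = true) :
    DimsM (H + 1) (W + 1) (skill.foldl applySkillA im) ∧
      ∀ i j, get2 (skill.foldl applySkillA im) i j =
        get2 im i j + (skill.map (fun s => diffC s i j)).sum := by
  induction skill generalizing im with
  | nil => exact ⟨hdim, by simp⟩
  | cons s rest ih =>
    obtain ⟨D1, G1⟩ := stepA hdim (hok s (by simp))
    obtain ⟨D2, G2⟩ := ih (applySkillA im s) D1 (fun x hx => hok x (by simp [hx]))
    refine ⟨D2, fun i j => ?_⟩
    rw [List.foldl_cons, G2, G1]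
    simp only [List.map_cons, List.sum_cons]
    ring

lemma colFoldV {H W : Nat} {im : List (List Int)} (j : Nat) (n : Nat)
    (hdim : DimsM (H + 1) (W + 1) im) (hj : j ≤ W) (hn : n ≤ H) :
    DimsM (H + 1) (W + 1) ((List.range n).foldl (fun im k => add2 im (k + 1) j (get2 im k j)) im) ∧
      ∀ i' j', get2 ((List.range n).foldl (fun im k => add2 im (k + 1) j (get2 im k j)) im) i' j' =
        if i' ≤ n ∧ j' = j then ∑ k ∈ Finset.range (i' + 1), get2 im k j else get2 im i' j' := by
  induction n with
  | zero =>
    refine ⟨by simpa using hdim, fun i' j' => ?_⟩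
    simp only [List.range_zero, List.foldl_nil]
    split_ifs with h
    · obtain ⟨h0, hj'⟩ := h
      have : i' = 0 := by omega
      subst this; subst hj'
      rw [Finset.sum_range_one]
    · rfl
  | succ n ih =>
    obtain ⟨D, G⟩ := ih (by omega)
    rw [List.range_succ, List.foldl_append, List.foldl_cons, List.foldl_nil]
    have hlen : n + 1 < ((List.range n).foldl (fun im k => add2 im (k + 1) j (get2 im k j)) im).length := by
      rw [D.1]; omega
    have hrow : j < (((List.range n).foldl (fun im k => add2 im (k + 1) j (get2 im k j)) im).getD (n + 1) []).length := by
      rw [D.2 _ (by omega)]; omega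
    refine ⟨dims_add2 _ _ _ D, fun i' j' => ?_⟩
    rw [get2_add2 _ _ _ _ _ hlen hrow, G i' j', G n j]
    by_cases hj' : j' = j
    · subst hj'
      by_cases hle : i' ≤ n
      · have h2 : ¬(i' = n + 1) := by omega
        simp [hle, h2, show i' ≤ n + 1 by omega]
      · by_cases heq : i' = n + 1
        · subst heq
          simp [hle]
          rw [Finset.sum_range_succ _ (n + 1)]
          ring
        · simp [hle, heq, show ¬(i' ≤ n + 1) by omega]
    · simp [hj']

lemma vSweep_get2 {H W : Nat} {im : List (List Int)} (hdim : DimsM (H + 1) (W + 1) im) :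
    DimsM (H + 1) (W + 1) (vSweep H W im) ∧
      ∀ i' j', get2 (vSweep H W im) i' j' =
        if i' ≤ H ∧ j' ≤ W then ∑ k ∈ Finset.range (i' + 1), get2 im k j' else get2 im i' j' := by
  have main : ∀ m, m ≤ W + 1 →
      DimsM (H + 1) (W + 1) ((List.range m).foldl (fun im j =>
          (List.range H).foldl (fun im k => add2 im (k + 1) j (get2 im k j)) im) im) ∧
        ∀ i' j', get2 ((List.range m).foldl (fun im j =>
            (List.range H).foldl (fun im k => add2 im (k + 1) j (get2 im k j)) im) im) i' j' =
          if j' < m ∧ i' ≤ H then ∑ k ∈ Finset.range (i' + 1), get2 im k j' else get2 im i' j' := by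
    intro m hm
    induction m with
    | zero => exact ⟨hdim, by simp⟩
    | succ m ih =>
      obtain ⟨D, G⟩ := ih (by omega)
      rw [List.range_succ, List.foldl_append, List.foldl_cons, List.foldl_nil]
      obtain ⟨D2, G2⟩ := colFoldV (im := (List.range m).foldl (fun im j =>
        (List.range H).foldl (fun im k => add2 im (k + 1) j (get2 im k j)) im) im) m H D (by omega) (le_refl H)
      refine ⟨D2, fun i' j' => ?_⟩
      rw [G2 i' j']
      by_cases hj' : j' = m
      · subst hj'
        by_cases hiH : i' ≤ H
        · have hsum : (∑ k ∈ Finset.range (i' + 1), get2 ((List.range j').foldl (fun im j =>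
              (List.range H).foldl (fun im k => add2 im (k + 1) j (get2 im k j)) im) im) k j') =
              ∑ k ∈ Finset.range (i' + 1), get2 im k j' :=
            Finset.sum_congr rfl (fun k _ => by rw [G]; simp)
          simp [hiH, hsum]
        · rw [if_neg (fun h => hiH h.1), G, if_neg (fun h => by omega),
            if_neg (fun h => hiH h.2)]
      · rw [if_neg (fun h => hj' h.2), G i' j']
        by_cases hlt : j' < m
        · have hlt' : j' < m + 1 := by omega
          simp [hlt, hlt']
        · have hlt' : ¬ (j' < m + 1) := by omega
          simp [hlt, hlt']
  obtain ⟨D, G⟩ := main (W + 1) (le_refl _)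
  refine ⟨D, fun i' j' => ?_⟩
  unfold vSweep
  rw [G i' j']
  by_cases h1 : j' ≤ W
  · have : j' < W + 1 := by omega
    simp [this, h1, and_comm]
  · have : ¬ (j' < W + 1) := by omega
    simp [this, h1]

lemma rowFoldH {H W : Nat} {im : List (List Int)} (i : Nat) (n : Nat)
    (hdim : DimsM (H + 1) (W + 1) im) (hi : i ≤ H) (hn : n ≤ W) :
    DimsM (H + 1) (W + 1) ((List.range n).foldl (fun im k => add2 im i (k + 1) (get2 im i k)) im) ∧
      ∀ i' j', get2 ((List.range n).foldl (fun im k => add2 im i (k + 1) (get2 im i k)) im) i' j' =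
        if i' = i ∧ j' ≤ n then ∑ l ∈ Finset.range (j' + 1), get2 im i l else get2 im i' j' := by
  induction n with
  | zero =>
    refine ⟨by simpa using hdim, fun i' j' => ?_⟩
    simp only [List.range_zero, List.foldl_nil]
    split_ifs with h
    · obtain ⟨hi', h0⟩ := h
      have : j' = 0 := by omega
      subst this; subst hi'
      rw [Finset.sum_range_one]
    · rfl
  | succ n ih =>
    obtain ⟨D, G⟩ := ih (by omega)
    rw [List.range_succ, List.foldl_append, List.foldl_cons, List.foldl_nil]
    have hlen : i < ((List.range n).foldl (fun im k => add2 im i (k + 1) (get2 im i k)) im).length := by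
      rw [D.1]; omega
    have hrow : n + 1 < (((List.range n).foldl (fun im k => add2 im i (k + 1) (get2 im i k)) im).getD i []).length := by
      rw [D.2 _ (by omega)]; omega
    refine ⟨dims_add2 _ _ _ D, fun i' j' => ?_⟩
    rw [get2_add2 _ _ _ _ _ hlen hrow, G i' j', G i n]
    by_cases hi' : i' = i
    · subst hi'
      by_cases hle : j' ≤ n
      · have h2 : ¬(j' = n + 1) := by omega
        simp [hle, h2, show j' ≤ n + 1 by omega]
      · by_cases heq : j' = n + 1
        · subst heq
          simp [hle]
          rw [Finset.sum_range_succ _ (n + 1)]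
          ring
        · simp [hle, heq, show ¬(j' ≤ n + 1) by omega]
    · simp [hi']

lemma hSweep_get2 {H W : Nat} {im : List (List Int)} (hdim : DimsM (H + 1) (W + 1) im) :
    DimsM (H + 1) (W + 1) (hSweep H W im) ∧
      ∀ i' j', get2 (hSweep H W im) i' j' =
        if i' ≤ H ∧ j' ≤ W then ∑ l ∈ Finset.range (j' + 1), get2 im i' l else get2 im i' j' := by
  have main : ∀ m, m ≤ H + 1 →
      DimsM (H + 1) (W + 1) ((List.range m).foldl (fun im i =>
          (List.range W).foldl (fun im k => add2 im i (k + 1) (get2 im i k)) im) im) ∧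
        ∀ i' j', get2 ((List.range m).foldl (fun im i =>
            (List.range W).foldl (fun im k => add2 im i (k + 1) (get2 im i k)) im) im) i' j' =
          if i' < m ∧ j' ≤ W then ∑ l ∈ Finset.range (j' + 1), get2 im i' l else get2 im i' j' := by
    intro m hm
    induction m with
    | zero => exact ⟨hdim, by simp⟩
    | succ m ih =>
      obtain ⟨D, G⟩ := ih (by omega)
      rw [List.range_succ, List.foldl_append, List.foldl_cons, List.foldl_nil]
      obtain ⟨D2, G2⟩ := rowFoldH (im := (List.range m).foldl (fun im i =>
        (List.range W).foldl (fun im k => add2 im i (k + 1) (get2 im i k)) im) im) m W D (by omega) (le_refl W)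
      refine ⟨D2, fun i' j' => ?_⟩
      rw [G2 i' j']
      by_cases hi' : i' = m
      · subst hi'
        by_cases hjW : j' ≤ W
        · have hsum : (∑ l ∈ Finset.range (j' + 1), get2 ((List.range i').foldl (fun i_1 i_2 =>
              (List.range W).foldl (fun im k => add2 im i_2 (k + 1) (get2 im i_2 k)) i_1) im) i' l) =
              ∑ l ∈ Finset.range (j' + 1), get2 im i' l :=
            Finset.sum_congr rfl (fun l _ => by rw [G]; simp)
          simp [hjW, hsum]
        · rw [if_neg (fun h => hjW h.2), G, if_neg (fun h => by omega),
            if_neg (fun h => hjW h.2)]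
      · rw [if_neg (fun h => hi' h.1), G i' j']
        by_cases hlt : i' < m
        · have hlt' : i' < m + 1 := by omega
          simp [hlt, hlt']
        · have hlt' : ¬ (i' < m + 1) := by omega
          simp [hlt, hlt']
  obtain ⟨D, G⟩ := main (H + 1) (le_refl _)
  refine ⟨D, fun i' j' => ?_⟩
  unfold hSweep
  rw [G i' j']
  by_cases h1 : i' ≤ H
  · have : i' < H + 1 := by omega
    simp [this, h1]
  · have : ¬ (i' < H + 1) := by omega
    simp [this, h1]

lemma addBoard_get2 {H W : Nat} {b : List (List Int)} (im : List (List Int))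
    (hb : DimsGe H W b) :
    DimsGe H W (addBoard H W im b) ∧
      ∀ i j, get2 (addBoard H W im b) i j =
        get2 b i j + if i < H ∧ j < W then get2 im i j else 0 := by
  have inner : ∀ (i : Nat), i < H → ∀ (c : List (List Int)), DimsGe H W c → ∀ (n : Nat), n ≤ W →
      DimsGe H W ((List.range n).foldl (fun c j => add2 c i j (get2 im i j)) c) ∧
        ∀ i' j', get2 ((List.range n).foldl (fun c j => add2 c i j (get2 im i j)) c) i' j' =
          get2 c i' j' + if i' = i ∧ j' < n then get2 im i j' else 0 := by
    intro i hi c hc n hn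
    induction n with
    | zero => exact ⟨hc, by simp⟩
    | succ n ih =>
      obtain ⟨D, G⟩ := ih (by omega)
      rw [List.range_succ, List.foldl_append, List.foldl_cons, List.foldl_nil]
      have hlen : i < ((List.range n).foldl (fun c j => add2 c i j (get2 im i j)) c).length := by
        rw [D.1]; omega
      have hrow : n < (((List.range n).foldl (fun c j => add2 c i j (get2 im i j)) c).getD i []).length := by
        have := D.2 _ hi; omega
      refine ⟨dimsGe_add2 _ _ _ D, fun i' j' => ?_⟩
      rw [get2_add2 _ _ _ _ _ hlen hrow, G i' j']
      by_cases hi' : i' = i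
      · subst hi'
        by_cases hj' : j' = n
        · subst hj'
          simp [show (j' < j' + 1) from by omega]
        · by_cases hlt : j' < n
          · simp [hj', hlt, show j' < n + 1 by omega]
          · simp [hj', hlt, show ¬ (j' < n + 1) by omega]
      · simp [hi']
  have outer : ∀ (m : Nat), m ≤ H →
      DimsGe H W ((List.range m).foldl (fun c i => (List.range W).foldl (fun c j => add2 c i j (get2 im i j)) c) b) ∧
        ∀ i' j', get2 ((List.range m).foldl (fun c i => (List.range W).foldl (fun c j => add2 c i j (get2 im i j)) c) b) i' j' =
          get2 b i' j' + if i' < m ∧ j' < W then get2 im i' j' else 0 := by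
    intro m hm
    induction m with
    | zero => exact ⟨hb, by simp⟩
    | succ m ih =>
      obtain ⟨D, G⟩ := ih (by omega)
      rw [List.range_succ, List.foldl_append, List.foldl_cons, List.foldl_nil]
      obtain ⟨D2, G2⟩ := inner m (by omega) _ D W (le_refl W)
      refine ⟨D2, fun i' j' => ?_⟩
      rw [G2 i' j', G i' j']
      by_cases hi' : i' = m
      · subst hi'
        simp [show i' < i' + 1 from by omega]
      · by_cases hlt : i' < m
        · simp [hi', hlt, show i' < m + 1 by omega]
        · simp [hi', hlt, show ¬ (i' < m + 1) by omega]
  obtain ⟨D, G⟩ := outer H (le_refl H)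
  exact ⟨D, G⟩

lemma pointSum (a b i j : Nat) (v : Int) :
    (∑ l ∈ Finset.range (j + 1), ∑ k ∈ Finset.range (i + 1),
      (if k = a ∧ l = b then v else 0)) = if a ≤ i ∧ b ≤ j then v else 0 := by
  have inner : ∀ l, (∑ k ∈ Finset.range (i + 1), (if k = a ∧ l = b then v else 0)) =
      if l = b then (if a ≤ i then v else 0) else 0 := by
    intro l
    by_cases hl : l = b
    · subst hl
      simp only [and_true]
      rw [Finset.sum_ite_eq' (Finset.range (i + 1)) a (fun _ => v)]
      simp [Finset.mem_range]
    · simp [hl]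
  rw [Finset.sum_congr rfl (fun l _ => inner l),
    Finset.sum_ite_eq' (Finset.range (j + 1)) b (fun _ => if a ≤ i then v else 0)]
  simp only [Finset.mem_range, Nat.lt_succ_iff]
  split_ifs <;> first | rfl | (exfalso; omega)

lemma prefix_diff {H W : Int} {s : List Int} (hok : skillOK H W s = true) (i j : Nat) :
    (∑ l ∈ Finset.range (j + 1), ∑ k ∈ Finset.range (i + 1), diffC s k l) = contribC s i j := by
  rcases s with _ | ⟨t, s⟩; · simp [skillOK] at hok
  rcases s with _ | ⟨r1, s⟩; · simp [skillOK] at hok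
  rcases s with _ | ⟨c1, s⟩; · simp [skillOK] at hok
  rcases s with _ | ⟨r2, s⟩; · simp [skillOK] at hok
  rcases s with _ | ⟨c2, s⟩; · simp [skillOK] at hok
  rcases s with _ | ⟨deg, s⟩; · simp [skillOK] at hok
  rcases s with _ | ⟨x, s⟩; swap; · simp [skillOK] at hok
  simp only [skillOK, decide_eq_true_eq] at hok
  obtain ⟨hr1, hr12, hr2, hc1, hc12, hc2⟩ := hok
  simp only [diffC, contribC]
  rw [Finset.sum_congr rfl (fun l _ => Finset.sum_add_distrib),
    Finset.sum_congr rfl (fun l _ => congrArg (· + _) Finset.sum_add_distrib),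
    Finset.sum_congr rfl (fun l _ => congrArg (· + _) (congrArg (· + _) Finset.sum_add_distrib)),
    Finset.sum_add_distrib, Finset.sum_add_distrib, Finset.sum_add_distrib,
    pointSum, pointSum, pointSum, pointSum]
  generalize (if t = 1 then -deg else deg) = d
  have h1 : r1.toNat ≤ r2.toNat := by omega
  have h2 : r2.toNat < (r2 + 1).toNat := by omega
  have h3 : c1.toNat ≤ c2.toNat := by omega
  have h4 : c2.toNat < (c2 + 1).toNat := by omega
  split_ifs <;> omega

lemma sum_map_swap (n : Nat) (l : List (List Int)) (g : List Int → Nat → Int) :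
    (∑ x ∈ Finset.range n, (l.map (fun s => g s x)).sum) =
      (l.map (fun s => ∑ x ∈ Finset.range n, g s x)).sum := by
  induction l with
  | nil => simp
  | cons s l ih => simp [Finset.sum_add_distrib, ih]

lemma rowB {H W : Nat} {b : List (List Int)} (i : Nat) (c1 : Int) (nC : Nat) (d : Int)
    (hb : DimsGe H W b) (hc1 : 0 ≤ c1) (hi : i < H) (hC : c1.toNat + nC ≤ W) :
    DimsGe H W ((List.range nC).foldl (fun b (l : Nat) => add2 b i (c1 + (l : Int)).toNat d) b) ∧
      ∀ i' j', get2 ((List.range nC).foldl (fun b (l : Nat) => add2 b i (c1 + (l : Int)).toNat d) b) i' j' =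
        get2 b i' j' + if i' = i ∧ c1.toNat ≤ j' ∧ j' < c1.toNat + nC then d else 0 := by
  induction nC with
  | zero =>
    refine ⟨hb, fun i' j' => ?_⟩
    rw [List.range_zero, List.foldl_nil, if_neg (fun h => by omega), add_zero]
  | succ n ih =>
    obtain ⟨D, G⟩ := ih (by omega)
    rw [List.range_succ, List.foldl_append, List.foldl_cons, List.foldl_nil]
    have hidx : (c1 + (n : Int)).toNat = c1.toNat + n := by omega
    have hlen : i < ((List.range n).foldl (fun b (l : Nat) => add2 b i (c1 + (l : Int)).toNat d) b).length := by
      rw [D.1]; omega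
    have hrow : (c1 + (n : Int)).toNat <
        (((List.range n).foldl (fun b (l : Nat) => add2 b i (c1 + (l : Int)).toNat d) b).getD i []).length := by
      have := D.2 _ hi; omega
    refine ⟨dimsGe_add2 _ _ _ D, fun i' j' => ?_⟩
    rw [get2_add2 _ _ _ _ _ hlen hrow, G i' j', hidx]
    generalize get2 b i' j' = X
    split_ifs <;> omega

lemma rectB {H W : Nat} {b : List (List Int)} (r1 c1 : Int) (nR nC : Nat) (d : Int)
    (hb : DimsGe H W b) (hr1 : 0 ≤ r1) (hc1 : 0 ≤ c1)
    (hR : r1.toNat + nR ≤ H) (hC : c1.toNat + nC ≤ W) :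
    DimsGe H W ((List.range nR).foldl (fun b (k : Nat) =>
        (List.range nC).foldl (fun b (l : Nat) => add2 b (r1 + (k : Int)).toNat (c1 + (l : Int)).toNat d) b) b) ∧
      ∀ i' j', get2 ((List.range nR).foldl (fun b (k : Nat) =>
          (List.range nC).foldl (fun b (l : Nat) => add2 b (r1 + (k : Int)).toNat (c1 + (l : Int)).toNat d) b) b) i' j' =
        get2 b i' j' +
          if r1.toNat ≤ i' ∧ i' < r1.toNat + nR ∧ c1.toNat ≤ j' ∧ j' < c1.toNat + nC then d else 0 := by
  induction nR with
  | zero =>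
    refine ⟨hb, fun i' j' => ?_⟩
    rw [List.range_zero, List.foldl_nil, if_neg (fun h => by omega), add_zero]
  | succ n ih =>
    obtain ⟨D, G⟩ := ih (by omega)
    rw [List.range_succ, List.foldl_append, List.foldl_cons, List.foldl_nil]
    have hidx : (r1 + (n : Int)).toNat = r1.toNat + n := by omega
    obtain ⟨D2, G2⟩ := rowB (H := H) (W := W) (r1 + (n : Int)).toNat c1 nC d D hc1 (by omega) hC
    refine ⟨D2, fun i' j' => ?_⟩
    rw [G2 i' j', G i' j', hidx]
    generalize get2 b i' j' = X
    split_ifs <;> omega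

lemma stepB {H W : Nat} {b : List (List Int)} {s : List Int}
    (hdim : DimsGe H W b) (hok : skillOK (H : Int) (W : Int) s = true) :
    DimsGe H W (applySkillB b s) ∧
      ∀ i j, get2 (applySkillB b s) i j = get2 b i j + contribC s i j := by
  rcases s with _ | ⟨t, s⟩; · simp [skillOK] at hok
  rcases s with _ | ⟨r1, s⟩; · simp [skillOK] at hok
  rcases s with _ | ⟨c1, s⟩; · simp [skillOK] at hok
  rcases s with _ | ⟨r2, s⟩; · simp [skillOK] at hok
  rcases s with _ | ⟨c2, s⟩; · simp [skillOK] at hok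
  rcases s with _ | ⟨deg, s⟩; · simp [skillOK] at hok
  rcases s with _ | ⟨x, s⟩; swap; · simp [skillOK] at hok
  simp only [skillOK, decide_eq_true_eq] at hok
  obtain ⟨hr1, hr12, hr2, hc1, hc12, hc2⟩ := hok
  simp only [applySkillB, PySem.List.pyRange_one, List.foldl_map]
  obtain ⟨D, G⟩ := rectB (H := H) (W := W) (b := b) r1 c1 (r2 + 1 - r1).toNat (c2 + 1 - c1).toNat
    (if t = 1 then -deg else deg) hdim hr1 hc1 (by omega) (by omega)
  refine ⟨D, fun i j => ?_⟩
  rw [G i j]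
  simp only [contribC]
  split_ifs <;> first | rfl | (exfalso; omega)

lemma foldlB {H W : Nat} (skill : List (List Int)) (b : List (List Int))
    (hdim : DimsGe H W b)
    (hok : ∀ s ∈ skill, skillOK (H : Int) (W : Int) s = true) :
    DimsGe H W (skill.foldl applySkillB b) ∧
      ∀ i j, get2 (skill.foldl applySkillB b) i j =
        get2 b i j + (skill.map (fun s => contribC s i j)).sum := by
  induction skill generalizing b with
  | nil => exact ⟨hdim, by simp⟩
  | cons s rest ih =>
    obtain ⟨D1, G1⟩ := stepB hdim (hok s (by simp))
    obtain ⟨D2, G2⟩ := ih (applySkillB b s) D1 (fun x hx => hok x (by simp [hx]))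
    refine ⟨D2, fun i j => ?_⟩
    rw [List.foldl_cons, G2, G1]
    simp only [List.map_cons, List.sum_cons]
    ring

lemma countA_congr {H W : Nat} {b1 b2 : List (List Int)}
    (h : ∀ i j, i < H → j < W → get2 b1 i j = get2 b2 i j) :
    countA H W b1 = countA H W b2 := by
  unfold countA
  apply PySem.List.foldl_congr_mem
  intro acc i hi
  apply PySem.List.foldl_congr_mem
  intro acc' j hj
  rw [h i j (List.mem_range.mp hi) (List.mem_range.mp hj)]

lemma countAB (H W : Nat) (b : List (List Int)) :
    countA H W b = ((List.range H).map (fun i =>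
      (((List.range W).countP (fun j => decide (0 < get2 b i j))) : Int))).sum := by
  unfold countA
  have inner : ∀ (acc : Int), ∀ i ∈ List.range H,
      (List.range W).foldl (fun acc j => if get2 b i j > 0 then acc + 1 else acc) acc
        = acc + ((List.range W).countP (fun j => decide (0 < get2 b i j)) : Int) := by
    intro acc i _
    have h := PySem.List.foldl_count_if (fun j => decide (0 < get2 b i j)) (List.range W) acc
    simpa using h
  rw [PySem.List.foldl_congr_mem _ _
    (fun acc i => acc + ((List.range W).countP (fun j => decide (0 < get2 b i j)) : Int)) _ inner]
  rw [PySem.List.foldl_add, zero_add]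

-- ===== VERDICT (by name: the statement is the Claim_ definition above) =====
theorem solution_spec : Claim_equal_solution := by
  intro board skill hdom hpre
  obtain ⟨hne, hrect, hok⟩ := hpre
  have hb : DimsGe board.length (board.getD 0 []).length board := by
    refine ⟨rfl, fun i hi => ?_⟩
    rw [List.getD_eq_getElem _ _ hi]
    exact hrect _ (List.getElem_mem hi)
  obtain ⟨D1, G1⟩ := foldlA (H := board.length) (W := (board.getD 0 []).length) skill
    (List.replicate (board.length + 1) (List.replicate ((board.getD 0 []).length + 1) (0 : Int)))
    (dims_replicate _ _) hok
  obtain ⟨D2, G2⟩ := vSweep_get2 D1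
  obtain ⟨D3, G3⟩ := hSweep_get2 D2
  obtain ⟨D4, G4⟩ := addBoard_get2 (b := board)
    (hSweep board.length (board.getD 0 []).length
      (vSweep board.length (board.getD 0 []).length
        (skill.foldl applySkillA
          (List.replicate (board.length + 1)
            (List.replicate ((board.getD 0 []).length + 1) (0 : Int)))))) hb
  obtain ⟨D5, G5⟩ := foldlB skill board hb hok
  show solution board skill = solution_alt board skill
  simp only [solution, solution_alt]
  rw [← countAB]
  apply countA_congr
  intro i j hi hj
  rw [G4 i j, if_pos ⟨hi, hj⟩, G5 i j]
  congr 1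
  rw [G3 i j, if_pos ⟨by omega, by omega⟩]
  have e1 : ∀ l ∈ Finset.range (j + 1),
      get2 (vSweep board.length (board.getD 0 []).length
        (skill.foldl applySkillA
          (List.replicate (board.length + 1)
            (List.replicate ((board.getD 0 []).length + 1) (0 : Int))))) i l =
      (skill.map (fun s => ∑ k ∈ Finset.range (i + 1), diffC s k l)).sum := by
    intro l hl
    have hlW : l ≤ (board.getD 0 []).length := by
      have := Finset.mem_range.mp hl; omega
    rw [G2 i l, if_pos ⟨by omega, hlW⟩]
    rw [Finset.sum_congr rfl (fun k _ => by rw [G1 k l, get2_replicate, zero_add])]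
    exact sum_map_swap _ _ _
  rw [Finset.sum_congr rfl e1, sum_map_swap]
  exact congrArg List.sum (List.map_congr_left (fun s hs => prefix_diff (hok s hs) i j))
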